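-- pv_equiv track=rewrite | github.com/dj-python/ID-Mapping_ETH | main.py | convert_hex_as_int
-- ===== SOURCE A (Python) =====
-- def convert_hex_as_int(s):
--     result = ''
--     i = 0
--     while i < len(s):
--         if s[i:i + 2].upper() == '0X':
--             j = i + 2
--             hex_str = ''
--             while j < len(s) and s[j].upper() in '0123456789ABCDEF':
--                 hex_str += s[j]
--                 j += 1
--             dec = str(int(hex_str, 16))
--             result += dec
--             i = j
--         else:
--             result += s[i]
--             i += 1
--     return result
-- ===== SOURCE B (Python) =====
-- import re
--
-- def convert_hex_as_int(s):
--     return re.sub(r'0[xX][0-9a-fA-F]*',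
--                   lambda m: str(int(m.group()[2:], 16)), s)
-- ===== Notes on version B (the rewrite author's own statement) =====
-- stated objective: faster
-- what changed: Replaces the hand-written char-by-char index/while scanner (with repeated string concatenation) by a single C-level regex substitution re.sub(r'0[xX][0-9a-fA-F]*', ...) with a replacement callback; B raises ValueError on exactly the same inputs as A (a reached hex prefix with no hex digits after it), and Pre_ excludes exactly those raising inputs, none on which A returns.
-- outside the precondition, e.g. on convert_hex_as_int('0x'): A raises ValueError, B raises ValueError; on convert_hex_as_int('0X'): A raises ValueError, B raises ValueError
import Mathlib
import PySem

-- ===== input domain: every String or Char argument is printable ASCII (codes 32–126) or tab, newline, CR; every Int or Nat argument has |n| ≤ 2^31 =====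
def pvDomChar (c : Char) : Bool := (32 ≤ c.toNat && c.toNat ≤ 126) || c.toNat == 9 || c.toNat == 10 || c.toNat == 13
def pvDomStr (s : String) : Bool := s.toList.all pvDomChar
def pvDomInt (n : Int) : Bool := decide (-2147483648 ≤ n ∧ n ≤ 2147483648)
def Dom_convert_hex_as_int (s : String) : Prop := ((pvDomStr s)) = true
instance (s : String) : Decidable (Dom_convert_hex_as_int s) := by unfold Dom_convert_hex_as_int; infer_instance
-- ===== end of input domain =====

-- B replaces A's hand-written index/while scanner by a single regex substitution
-- (re.sub with a replacement callback); B raises exactly where A raises.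

-- shared helper: Python's int(hex_str, 16) restricted to strings of hex digits
-- (exact there: both programs only call it on the scanned hex-digit run)
def pvHexDigit (c : Char) : Nat :=
  if c ≤ '9' then c.toNat - 48 else if c ≤ 'F' then c.toNat - 55 else c.toNat - 87

def pvHexToNat (l : List Char) : Nat := l.foldl (fun a c => 16 * a + pvHexDigit c) 0

-- ===== PORT A =====
-- s[j].upper() in '0123456789ABCDEF'
def pvIsHexA (c : Char) : Bool := "0123456789ABCDEF".toList.contains c.toUpper

-- the while-loop over i; the current suffix s[i:] is the argument; none = the
-- ValueError of int('', 16) (excluded by Pre_)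
def pvGoA : List Char → Option (List Char)
  | [] => some []
  | [c0] => some [c0]                                      -- s[i:i+2] has length 1 ≠ '0X'
  | c0 :: c1 :: rest2 =>
    if c0 == '0' && c1.toUpper == 'X' then                 -- s[i:i+2].upper() == '0X'
      let hex := rest2.takeWhile pvIsHexA                  -- inner while: hex_str
      let rest3 := rest2.dropWhile pvIsHexA                -- i = j
      if hex.isEmpty then none                             -- int('', 16) raises ValueError
      else (pvGoA rest3).map
        (fun t => (PySem.Int.toStr ((pvHexToNat hex : Nat) : Int)).toList ++ t)
    else (pvGoA (c1 :: rest2)).map (c0 :: ·)               -- result += s[i]; i += 1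
  termination_by cs => cs.length
  decreasing_by
  · have := (List.dropWhile_sublist (l := rest2) (p := pvIsHexA)).length_le
    simp only [List.length_cons]; omega
  · simp

def convert_hex_as_int (s : String) : String :=
  match pvGoA s.toList with
  | some l => String.ofList l
  | none => ""                                             -- unreachable under Pre_ (Python raises)

-- ===== PORT B =====
-- the regex character class [0-9a-fA-F]
def pvIsHexB (c : Char) : Bool :=
  ('0' ≤ c && c ≤ '9') || ('a' ≤ c && c ≤ 'f') || ('A' ≤ c && c ≤ 'F')

-- leftmost match of 0[xX][0-9a-fA-F]* : returns (text before the match,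
-- the greedy hex-digit run, the text after the match), or none if no match
def pvFindM : List Char → Option (List Char × List Char × List Char)
  | [] => none
  | [_] => none
  | c0 :: c1 :: rest2 =>
    if c0 == '0' && (c1 == 'x' || c1 == 'X') then
      some ([], rest2.takeWhile pvIsHexB, rest2.dropWhile pvIsHexB)
    else (pvFindM (c1 :: rest2)).map (fun pr => (c0 :: pr.1, pr.2.1, pr.2.2))

-- needed by pvGoB's termination: the text after a match is strictly shorter
theorem pvFindM_rest_length :
    ∀ (cs : List Char) {p h r : List Char}, pvFindM cs = some (p, h, r) → r.length < cs.length := by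
  intro cs
  induction cs with
  | nil => intro p h r hf; simp [pvFindM] at hf
  | cons c0 rest ih =>
    cases rest with
    | nil => intro p h r hf; simp [pvFindM] at hf
    | cons c1 rest2 =>
      intro p h r hf
      simp only [pvFindM] at hf
      split at hf
      · simp only [Option.some.injEq, Prod.mk.injEq] at hf
        obtain ⟨rfl, rfl, rfl⟩ := hf
        have := (List.dropWhile_sublist (l := rest2) (p := pvIsHexB)).length_le
        simp only [List.length_cons]; omega
      · obtain ⟨pr, hpr, heq⟩ := Option.map_eq_some_iff.mp hf
        obtain ⟨p', h', r'⟩ := pr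
        simp only [Prod.mk.injEq] at heq
        obtain ⟨rfl, rfl, rfl⟩ := heq
        have := ih hpr
        simp only [List.length_cons] at this ⊢
        omega

-- re.sub: find the leftmost match, emit prefix + replacement, continue after it;
-- none = the ValueError of int('', 16) in the callback (excluded by Pre_)
def pvGoB (cs : List Char) : Option (List Char) :=
  match hf : pvFindM cs with
  | none => some cs
  | some (p, hex, r) =>
    if hex.isEmpty then none
    else (pvGoB r).map
      (fun t => p ++ (PySem.Int.toStr ((pvHexToNat hex : Nat) : Int)).toList ++ t)
  termination_by cs.length
  decreasing_by exact pvFindM_rest_length cs hf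

def convert_hex_as_int_alt (s : String) : String :=
  match pvGoB s.toList with
  | some l => String.ofList l
  | none => ""                                             -- unreachable under Pre_ (Python raises)

-- ===== PRECONDITION & SPEC =====
-- helpers describing the shape of the input around one '0[xX]' occurrence:
-- pvBack l i = length of the contiguous block of hex digits ending strictly before position i
def pvBack (l : List Char) : Nat → Nat
  | 0 => 0
  | i + 1 => if l[i]?.elim false pvIsHexB then pvBack l i + 1 else 0

-- pvChain l i (for a position i holding a '0'): length of the nested chain of
-- '0[xX]<hex-run>' literals each of whose hex run ends exactly at the previous
-- literal's leading '0' (the maximal hex run ending at i starts at m = i - pvBack l i;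
-- the chain continues iff positions m-2, m-1 hold '0' and 'x'/'X')
def pvChain (l : List Char) (i : Nat) : Nat :=
  let m := i - pvBack l i
  if h : 2 ≤ m ∧ (l[m-1]? = some 'x' ∨ l[m-1]? = some 'X') ∧ l[m-2]? = some '0'
  then pvChain l (m - 2) + 1
  else 0
  termination_by i
  decreasing_by have := Nat.sub_le i (pvBack l i); omega

-- a '0[xX]' occurrence at i with no hex digit after it (int('', 16) would raise there)
def pvBad (l : List Char) (i : Nat) : Bool :=
  l[i]? == some '0' && (l[i+1]? == some 'x' || l[i+1]? == some 'X') &&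
    !(l[i+2]?.elim false pvIsHexB)

-- Pre_ holds exactly on the inputs where A returns: A raises ValueError iff some
-- digit-less '0[xX]' occurrence is actually reached by the scanner, which happens
-- iff the nested swallow-chain of hex literals ending at its '0' has EVEN length
-- (chain length 0: the bare '0x' itself; odd length: the '0' is consumed as the
-- last digit of a preceding literal's hex run, so the scanner skips it). B raises
-- on exactly the same inputs, so nothing A returns on is excluded.
def Pre_convert_hex_as_int (s : String) : Prop :=
  ∀ i < s.toList.length, pvBad s.toList i = true → pvChain s.toList i % 2 = 1
instance (s : String) : Decidable (Pre_convert_hex_as_int s) := by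
  unfold Pre_convert_hex_as_int; infer_instance

def pvWitness_convert_hex_as_int : String := "a 0x1f b"

def Spec_convert_hex_as_int (s : String) (out : String) : Prop := out = convert_hex_as_int_alt s
instance (s : String) (out : String) : Decidable (Spec_convert_hex_as_int s out) := by unfold Spec_convert_hex_as_int; infer_instance

-- ===== CLAIM (what is proved, stated in full; the proofs are below) =====
def Claim_equal_convert_hex_as_int : Prop := ∀ (s : String), Dom_convert_hex_as_int s → Pre_convert_hex_as_int s → Spec_convert_hex_as_int s (convert_hex_as_int s)

-- ===== LEMMAS AND PROOFS =====

-- A's test s[i:i+2].upper() == '0X' equals B's regex test 0[xX]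
theorem pvUpperX (c : Char) : (c.toUpper == 'X') = (c == 'x' || c == 'X') := by
  have hx : ('x' : Char).val.toNat = 120 := rfl
  have hX : ('X' : Char).val.toNat = 88 := rfl
  apply Bool.eq_iff_iff.mpr
  simp only [Char.toUpper]
  split
  · rename_i h
    have h1 : 97 ≤ c.val.toNat := UInt32.le_iff_toNat_le.mp h.1
    have h2 : c.val.toNat ≤ 122 := UInt32.le_iff_toNat_le.mp h.2
    simp only [beq_iff_eq, Bool.or_eq_true, Char.ext_iff, UInt32.ext_iff, UInt32.toNat_add,
      show ('A'.val - 'a'.val).toNat = 4294967264 from rfl, hx, hX]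
    omega
  · rename_i h
    have h' : ¬(97 ≤ c.val.toNat ∧ c.val.toNat ≤ 122) := by
      intro ⟨a, b⟩
      exact h ⟨UInt32.le_iff_toNat_le.mpr a, UInt32.le_iff_toNat_le.mpr b⟩
    simp only [beq_iff_eq, Bool.or_eq_true, Char.ext_iff, UInt32.ext_iff, hx, hX]
    omega

theorem pvCond_eq (c0 c1 : Char) :
    (c0 == '0' && c1.toUpper == 'X') = (c0 == '0' && (c1 == 'x' || c1 == 'X')) := by
  rw [pvUpperX]

-- A's hex-digit test (upper-cased membership) equals B's character class
theorem pvIsHex_eq : pvIsHexA = pvIsHexB := by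
  funext c
  apply Bool.eq_iff_iff.mpr
  have hl : "0123456789ABCDEF".toList
      = ['0','1','2','3','4','5','6','7','8','9','A','B','C','D','E','F'] := rfl
  simp only [pvIsHexA, pvIsHexB, Char.toUpper]
  split <;> rename_i h <;>
  · first
      | (have h1 : 97 ≤ c.val.toNat := UInt32.le_iff_toNat_le.mp h.1
         have h2 : c.val.toNat ≤ 122 := UInt32.le_iff_toNat_le.mp h.2)
      | (have h' : ¬(97 ≤ c.val.toNat ∧ c.val.toNat ≤ 122) := by
           intro ⟨a, b⟩
           exact h ⟨UInt32.le_iff_toNat_le.mpr a, UInt32.le_iff_toNat_le.mpr b⟩)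
    simp only [hl, List.contains_eq_mem, decide_eq_true_eq, List.mem_cons,
      List.not_mem_nil, or_false, Bool.or_eq_true, Bool.and_eq_true, decide_eq_true_eq,
      Char.le_def, UInt32.le_iff_toNat_le, Char.ext_iff, UInt32.ext_iff, UInt32.toNat_add,
      show ('A'.val - 'a'.val).toNat = 4294967264 from rfl,
      show ('0':Char).val.toNat = 48 from rfl, show ('1':Char).val.toNat = 49 from rfl,
      show ('2':Char).val.toNat = 50 from rfl, show ('3':Char).val.toNat = 51 from rfl,
      show ('4':Char).val.toNat = 52 from rfl, show ('5':Char).val.toNat = 53 from rfl,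
      show ('6':Char).val.toNat = 54 from rfl, show ('7':Char).val.toNat = 55 from rfl,
      show ('8':Char).val.toNat = 56 from rfl, show ('9':Char).val.toNat = 57 from rfl,
      show ('A':Char).val.toNat = 65 from rfl, show ('B':Char).val.toNat = 66 from rfl,
      show ('C':Char).val.toNat = 67 from rfl, show ('D':Char).val.toNat = 68 from rfl,
      show ('E':Char).val.toNat = 69 from rfl, show ('F':Char).val.toNat = 70 from rfl,
      show ('a':Char).val.toNat = 97 from rfl, show ('f':Char).val.toNat = 102 from rfl]
    omega

theorem pvGoA_of_findM_none : ∀ (cs : List Char), pvFindM cs = none → pvGoA cs = some cs := by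
  intro cs
  induction cs with
  | nil => intro _; simp [pvGoA]
  | cons c0 rest ih =>
    cases rest with
    | nil => intro _; simp [pvGoA]
    | cons c1 rest2 =>
      intro hf
      simp only [pvFindM] at hf
      split at hf
      · exact absurd hf (by simp)
      · rename_i hcond
        have hnone : pvFindM (c1 :: rest2) = none := by
          cases hmap : pvFindM (c1 :: rest2) with
          | none => rfl
          | some pr => rw [hmap] at hf; simp at hf
        rw [pvGoA, pvCond_eq, if_neg (by simpa using hcond), ih hnone]
        rfl

-- A, at the leftmost '0[xX]' occurrence, does exactly what B's substitution step does
theorem pvGoA_of_findM_some :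
    ∀ (cs p h r : List Char), pvFindM cs = some (p, h, r) →
      pvGoA cs = if h.isEmpty then none
        else (pvGoA r).map
          (fun t => p ++ (PySem.Int.toStr ((pvHexToNat h : Nat) : Int)).toList ++ t) := by
  intro cs
  induction cs with
  | nil => intro p h r hf; simp [pvFindM] at hf
  | cons c0 rest ih =>
    cases rest with
    | nil => intro p h r hf; simp [pvFindM] at hf
    | cons c1 rest2 =>
      intro p h r hf
      simp only [pvFindM] at hf
      split at hf
      · rename_i hcond
        simp only [Option.some.injEq, Prod.mk.injEq] at hf
        obtain ⟨rfl, rfl, rfl⟩ := hf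
        rw [pvGoA, pvCond_eq, if_pos hcond, pvIsHex_eq]
        simp only [List.nil_append]
      · rename_i hcond
        obtain ⟨pr, hpr, heq⟩ := Option.map_eq_some_iff.mp hf
        obtain ⟨p', h', r'⟩ := pr
        simp only [Prod.mk.injEq] at heq
        obtain ⟨rfl, rfl, rfl⟩ := heq
        rw [pvGoA, pvCond_eq, if_neg (by simpa using hcond), ih p' h' r' hpr]
        by_cases he : h'.isEmpty
        · simp [he]
        · simp only [if_neg he]
          cases pvGoA r' <;> simp

-- the two ports compute the same Option everywhere (both none exactly where Python raises)
theorem pvGo_eq : ∀ (cs : List Char), pvGoA cs = pvGoB cs := by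
  intro cs
  induction hn : cs.length using Nat.strong_induction_on generalizing cs with
  | _ n ihn =>
  rw [pvGoB]
  cases hf : pvFindM cs with
  | none => simp only; exact pvGoA_of_findM_none cs hf
  | some phr =>
    obtain ⟨p, h, r⟩ := phr
    simp only
    rw [pvGoA_of_findM_some cs p h r hf]
    by_cases he : h.isEmpty
    · simp [he]
    · simp only [if_neg he]
      rw [ihn r.length (hn ▸ pvFindM_rest_length cs hf) r rfl]

-- ===== VERDICT (by name: the statement is the Claim_ definition above) =====
theorem convert_hex_as_int_spec : Claim_equal_convert_hex_as_int := by
  intro s _ _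
  unfold Spec_convert_hex_as_int convert_hex_as_int convert_hex_as_int_alt
  rw [pvGo_eq s.toList]
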